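-- pv_equiv track=rewrite | github.com/belokmaster/Construction-and-Analysis-of-algorithms-course-2025 | lab2/greedA/python.py | greedy_traversal
-- ===== SOURCE A (Python) =====
-- def greedy_traversal(start, end, graph: dict, passed=""):
--     if start == end:
--         return start
--     if start not in graph.keys() or not graph[start] or start in passed:
--         return None
--     for k, _ in sorted(graph[start].items(), key=lambda pairs: pairs[1]):
--         rslt = greedy_traversal(k, end, graph, passed=passed+start)
--         if rslt != None:
--             return start+rslt
-- ===== SOURCE B (Python) =====
-- def greedy_traversal(start, end, graph: dict, passed=""):
--     # Iterative DFS with an explicit stack instead of recursion; same greedy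
--     # (lowest-weight-first) preorder and the same substring cycle check.
--     stack = [(start, "")]
--     while stack:
--         node, path = stack.pop()
--         if node == end:
--             return path + node
--         nbrs = graph.get(node)
--         if not nbrs or node in passed + path:
--             continue
--         for k, _ in reversed(sorted(nbrs.items(), key=lambda p: p[1])):
--             stack.append((k, path + node))
--     return None
-- ===== Notes on version B (the rewrite author's own statement) =====
-- stated objective: alternative
-- what changed: A's recursive greedy DFS is replaced by an iterative DFS with an explicit stack of (node, path) frames, pushing the sorted neighbours in reverse so the lowest-weight edge is explored first; same substring cycle check and same concatenated-string result.
import Mathlib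
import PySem

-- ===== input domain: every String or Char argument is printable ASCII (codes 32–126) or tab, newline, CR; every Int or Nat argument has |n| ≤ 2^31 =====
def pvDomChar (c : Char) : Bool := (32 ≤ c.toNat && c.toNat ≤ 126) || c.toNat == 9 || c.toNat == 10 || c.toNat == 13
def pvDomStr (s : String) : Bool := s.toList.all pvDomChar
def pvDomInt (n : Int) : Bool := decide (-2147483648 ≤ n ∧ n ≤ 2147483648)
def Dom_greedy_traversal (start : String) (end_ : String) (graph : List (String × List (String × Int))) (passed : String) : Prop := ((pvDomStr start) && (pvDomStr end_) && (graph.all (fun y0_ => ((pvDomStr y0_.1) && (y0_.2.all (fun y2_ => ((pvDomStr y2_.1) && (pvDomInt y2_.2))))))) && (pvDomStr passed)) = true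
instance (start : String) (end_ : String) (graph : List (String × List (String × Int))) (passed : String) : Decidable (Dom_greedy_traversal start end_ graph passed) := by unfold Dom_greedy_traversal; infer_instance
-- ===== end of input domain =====

-- B replaces A's recursive greedy DFS by an explicit-stack iterative DFS with the
-- same lowest-weight-first preorder and the same substring cycle check (objective: alternative).

-- ===== PORT A =====
-- Recursive DFS, fuel = graph.length + 2 is a totality guard only: each nested
-- recursive call appends a fresh graph key to `passed`, so the call depth is at
-- most the number of keys plus one and the fuel is never exhausted.
def gtA (graph : List (String × List (String × Int))) (end_ : String) : Nat → String → String → Option String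
  | 0, _, _ => none
  | fuel+1, start, passed =>
    if start = end_ then some start
    else if ((PySem.Dict.mk graph).get? start).isNone
            || ((PySem.Dict.mk graph).getD start []).isEmpty
            || PySem.Str.isIn start passed then none
    else
      -- 'for k, _ in sorted(...): rslt = rec; if rslt != None: return start+rslt'
      (PySem.List.sorted ((PySem.Dict.mk graph).getD start []) (fun q => q.2) false).findSome?
        (fun q => (gtA graph end_ fuel q.1 (passed ++ start)).map (fun r => start ++ r))

def greedy_traversal (start : String) (end_ : String) (graph : List (String × List (String × Int))) (passed : String) : Option String :=
  gtA graph end_ (graph.length + 2) start passed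

-- ===== PORT B =====
-- Explicit stack of (node, path) frames; head of the list = top of the stack, so
-- Python's 'stack.append' over the reversed sorted neighbours is a foldl with cons.
-- Fuel = (total neighbour count + 1)^(graph.length + 2) is a totality guard only:
-- it bounds the number of pops (the DFS tree has depth ≤ graph.length + 2 and
-- branching ≤ the total neighbour count), it is never exhausted.
def gtB (graph : List (String × List (String × Int))) (end_ : String) (passed : String) : Nat → List (String × String) → Option String
  | 0, _ => none
  | _+1, [] => none
  | fuel+1, (node, path) :: rest =>
    if node = end_ then some (path ++ node)
    else
      match (PySem.Dict.mk graph).get? node with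
      | none => gtB graph end_ passed fuel rest
      | some nbrs =>
        if nbrs.isEmpty || PySem.Str.isIn node (passed ++ path) then
          gtB graph end_ passed fuel rest
        else
          gtB graph end_ passed fuel
            ((PySem.List.sorted nbrs (fun q => q.2) false).reverse.foldl
              (fun st q => (q.1, path ++ node) :: st) rest)

def greedy_traversal_alt (start : String) (end_ : String) (graph : List (String × List (String × Int))) (passed : String) : Option String :=
  gtB graph end_ passed (((graph.map (fun q => q.2.length)).sum + 1) ^ (graph.length + 2)) [(start, "")]

-- ===== PRECONDITION & SPEC =====
def Spec_greedy_traversal (start : String) (end_ : String) (graph : List (String × List (String × Int))) (passed : String) (out : Option String) : Prop := out = greedy_traversal_alt start end_ graph passed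
instance (start : String) (end_ : String) (graph : List (String × List (String × Int))) (passed : String) (out : Option String) : Decidable (Spec_greedy_traversal start end_ graph passed out) := by unfold Spec_greedy_traversal; infer_instance

-- ===== CLAIM (what is proved, stated in full; the proofs are below) =====
def Claim_equal_greedy_traversal : Prop := ∀ (start : String) (end_ : String) (graph : List (String × List (String × Int))) (passed : String), Dom_greedy_traversal start end_ graph passed → Spec_greedy_traversal start end_ graph passed (greedy_traversal start end_ graph passed)

-- ===== LEMMAS AND PROOFS =====

-- number of graph keys not yet a substring of `passed`; strictly decreases at each
-- nested recursive call of A, so it bounds the recursion depth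
def muKeys (graph : List (String × List (String × Int))) (p : String) : Nat :=
  ((graph.map Prod.fst).filter (fun k => !PySem.Str.isIn k p)).length

-- fuel-indexed size of A's search tree; bounds the number of pops B performs
def sizeF (graph : List (String × List (String × Int))) (end_ : String) : Nat → String → String → Nat
  | 0, _, _ => 1
  | fuel+1, start, passed =>
    if start = end_ then 1
    else if ((PySem.Dict.mk graph).get? start).isNone
            || ((PySem.Dict.mk graph).getD start []).isEmpty
            || PySem.Str.isIn start passed then 1
    else 1 + ((PySem.List.sorted ((PySem.Dict.mk graph).getD start []) (fun q => q.2) false).map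
               (fun q => sizeF graph end_ fuel q.1 (passed ++ start))).sum

lemma isIn_append_right (k p s : String) (h : PySem.Str.isIn k p = true) :
    PySem.Str.isIn k (p ++ s) = true := by
  rw [PySem.Str.isIn_iff_infix] at h ⊢
  rw [String.toList_append]
  exact h.trans ((List.prefix_append _ _).isInfix)

lemma isIn_self_append (p s : String) : PySem.Str.isIn s (p ++ s) = true := by
  rw [PySem.Str.isIn_iff_infix, String.toList_append]
  exact (List.suffix_append _ _).isInfix

lemma filter_length_lt {α : Type} (p q : α → Bool) (x : α)
    (hp : p x = true) (hq : q x = false) :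
    ∀ l : List α, (∀ y ∈ l, q y = true → p y = true) → x ∈ l →
      (l.filter q).length < (l.filter p).length := by
  intro l
  induction l with
  | nil => intro _ hx; cases hx
  | cons a t ih =>
    intro himp hx
    rcases List.mem_cons.mp hx with hxa | hxt
    · subst hxa
      have hle : (t.filter q).length ≤ (t.filter p).length := by
        rw [← List.countP_eq_length_filter, ← List.countP_eq_length_filter]
        exact List.countP_mono_left (fun y hy => himp y (List.mem_cons_of_mem _ hy))
      simp only [List.filter_cons, hp, hq, Bool.false_eq_true, if_false, if_true,
        List.length_cons]
      omega
    · have ht := ih (fun y hy => himp y (List.mem_cons_of_mem _ hy)) hxt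
      by_cases hqa : q a = true
      · have hpa := himp a List.mem_cons_self hqa
        simp only [List.filter_cons, hqa, hpa, if_true, List.length_cons]
        omega
      · rw [Bool.not_eq_true] at hqa
        simp only [List.filter_cons, hqa, Bool.false_eq_true, if_false]
        cases hpa : p a <;> simp only [Bool.false_eq_true, if_false, if_true,
          List.length_cons] <;> omega

lemma mem_keys_of_get?_isSome (graph : List (String × List (String × Int))) (s : String)
    (h : ((PySem.Dict.mk graph).get? s).isSome = true) : s ∈ graph.map Prod.fst := by
  simp only [PySem.Dict.get?, Option.isSome_map] at h
  rw [Option.isSome_iff_exists] at h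
  obtain ⟨pr, hpr⟩ := h
  have hm := List.mem_of_find?_eq_some hpr
  have he := List.find?_some hpr
  simp only [beq_iff_eq] at he
  exact he ▸ List.mem_map_of_mem hm

lemma mu_lt (graph : List (String × List (String × Int))) (start passed : String)
    (hmem : ((PySem.Dict.mk graph).get? start).isSome = true)
    (hin : PySem.Str.isIn start passed = false) :
    muKeys graph (passed ++ start) < muKeys graph passed := by
  refine filter_length_lt _ _ start
    (by simp only [hin, Bool.not_false])
    (by simp only [isIn_self_append, Bool.not_true])
    (graph.map Prod.fst) ?_ (mem_keys_of_get?_isSome graph start hmem)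
  intro y _ hq
  simp only [Bool.not_eq_true'] at hq ⊢
  cases h2 : PySem.Str.isIn y passed
  · rfl
  · rw [isIn_append_right y passed start h2] at hq
    cases hq

lemma get?_value_mem (graph : List (String × List (String × Int))) (s : String)
    (v : List (String × Int)) (h : (PySem.Dict.mk graph).get? s = some v) :
    ∃ pr ∈ graph, pr.2 = v := by
  simp only [PySem.Dict.get?, Option.map_eq_some_iff] at h
  obtain ⟨pr, hpr, hv⟩ := h
  exact ⟨pr, List.mem_of_find?_eq_some hpr, hv⟩

lemma sizeF_le (graph : List (String × List (String × Int))) (end_ : String) :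
    ∀ fuel start passed,
      sizeF graph end_ fuel start passed ≤ ((graph.map (fun q => q.2.length)).sum + 1) ^ fuel := by
  intro fuel
  induction fuel with
  | zero => intro start passed; simp [sizeF]
  | succ f ih =>
    intro start passed
    set K := (graph.map (fun q => q.2.length)).sum with hK
    have hpos : 1 ≤ (K + 1) ^ (f + 1) := Nat.one_le_pow _ _ (by omega)
    rw [sizeF]
    split
    · exact hpos
    · split
      · exact hpos
      · rename_i hend hguard
        -- the guard is false, so get? start = some nbrs with nbrs ≤ the total count
        have hsome : ((PySem.Dict.mk graph).get? start).isSome = true := by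
          cases hc : ((PySem.Dict.mk graph).get? start) with
          | none => simp [hc] at hguard
          | some v => simp
        obtain ⟨nbrs, hnbrs⟩ := Option.isSome_iff_exists.mp hsome
        have hgetD : (PySem.Dict.mk graph).getD start [] = nbrs := by
          simp [PySem.Dict.getD, hnbrs]
        have hlen : nbrs.length ≤ K := by
          obtain ⟨pr, hprm, hpr2⟩ := get?_value_mem graph start nbrs hnbrs
          have hmem2 : pr.2.length ∈ graph.map (fun q => q.2.length) :=
            List.mem_map_of_mem hprm
          have hss := List.single_le_sum (l := graph.map (fun q => q.2.length))
            (fun x _ => Nat.zero_le x) _ hmem2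
          rw [hpr2] at hss
          rw [hK]
          exact hss
        have hslen : (PySem.List.sorted ((PySem.Dict.mk graph).getD start []) (fun q => q.2) false).length = nbrs.length := by
          rw [hgetD]
          exact (PySem.List.sorted_perm nbrs (fun q => q.2) false).length_eq
        have hsum : ((PySem.List.sorted ((PySem.Dict.mk graph).getD start []) (fun q => q.2) false).map
               (fun q => sizeF graph end_ f q.1 (passed ++ start))).sum ≤ nbrs.length * (K + 1) ^ f := by
          have := List.sum_le_card_nsmul
            ((PySem.List.sorted ((PySem.Dict.mk graph).getD start []) (fun q => q.2) false).map
              (fun q => sizeF graph end_ f q.1 (passed ++ start)))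
            ((K + 1) ^ f)
            (by
              intro x hx
              obtain ⟨q, _, hq⟩ := List.mem_map.mp hx
              exact hq ▸ ih q.1 (passed ++ start))
          simpa [List.length_map, hslen, smul_eq_mul] using this
        have hf : 1 ≤ (K + 1) ^ f := Nat.one_le_pow _ _ (by omega)
        have : (K + 1) ^ (f + 1) = (K + 1) ^ f + K * (K + 1) ^ f := by ring
        have hmul : nbrs.length * (K + 1) ^ f ≤ K * (K + 1) ^ f :=
          Nat.mul_le_mul_right _ hlen
        omega

lemma gtB_nil (graph : List (String × List (String × Int))) (end_ passed : String) (f : Nat) :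
    gtB graph end_ passed f [] = none := by
  cases f <;> simp [gtB]

lemma push_rev_foldl {α β : Type} (l : List α) (f : α → β) (st : List β) :
    l.reverse.foldl (fun s x => f x :: s) st = l.map f ++ st := by
  induction l generalizing st with
  | nil => simp
  | cons a t ih => simp [List.foldl_append, ih]

-- children step: running the machine on the pushed frames of `cs` realises A's
-- first-success scan over `cs`
lemma run_eq_children (graph : List (String × List (String × Int))) (end_ passed : String)
    (f' : Nat) (node path : String)
    (ih : ∀ node' path' rest f, muKeys graph (passed ++ path') + 1 ≤ f' →
      gtB graph end_ passed (sizeF graph end_ f' node' (passed ++ path') + f) ((node', path') :: rest)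
        = match gtA graph end_ f' node' (passed ++ path') with
          | some r => some (path' ++ r)
          | none => gtB graph end_ passed f rest)
    (hmu : muKeys graph (passed ++ (path ++ node)) + 1 ≤ f') :
    ∀ (cs : List (String × Int)) (rest : List (String × String)) (f : Nat),
      gtB graph end_ passed
        ((cs.map (fun q => sizeF graph end_ f' q.1 (passed ++ path ++ node))).sum + f)
        (cs.map (fun q => (q.1, path ++ node)) ++ rest)
      = match cs.findSome?
            (fun q => (gtA graph end_ f' q.1 (passed ++ path ++ node)).map (fun r => node ++ r)) with
        | some r => some (path ++ r)
        | none => gtB graph end_ passed f rest := by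
  intro cs
  induction cs with
  | nil => intro rest f; simp
  | cons c t iht =>
    intro rest f
    have hassoc : passed ++ path ++ node = passed ++ (path ++ node) := String.append_assoc
    rw [List.map_cons, List.map_cons, List.sum_cons, List.cons_append, Nat.add_assoc]
    rw [hassoc]
    rw [ih c.1 (path ++ node) (t.map (fun q => (q.1, path ++ node)) ++ rest)
      ((t.map (fun q => sizeF graph end_ f' q.1 (passed ++ (path ++ node)))).sum + f) hmu]
    rw [List.findSome?_cons]
    cases hc : gtA graph end_ f' c.1 (passed ++ (path ++ node)) with
    | some r =>
      simp only [Option.map_some, String.append_assoc]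
    | none =>
      simp only [Option.map_none]
      simpa only [hassoc] using iht rest f

-- main simulation lemma: one frame of the machine computes A's recursive result
lemma run_eq (graph : List (String × List (String × Int))) (end_ passed : String) :
    ∀ fA node path rest f,
      muKeys graph (passed ++ path) + 1 ≤ fA →
      gtB graph end_ passed (sizeF graph end_ fA node (passed ++ path) + f) ((node, path) :: rest)
        = match gtA graph end_ fA node (passed ++ path) with
          | some r => some (path ++ r)
          | none => gtB graph end_ passed f rest := by
  intro fA
  induction fA with
  | zero => intro node path rest f h; omega
  | succ f' ih =>
    intro node path rest f _hle
    by_cases hend : node = end_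
    · rw [sizeF, gtA, if_pos hend, if_pos hend, Nat.add_comm 1 f, gtB, if_pos hend]
    · cases hg : (PySem.Dict.mk graph).get? node with
      | none =>
        have hguard : (((PySem.Dict.mk graph).get? node).isNone
            || ((PySem.Dict.mk graph).getD node []).isEmpty
            || PySem.Str.isIn node (passed ++ path)) = true := by simp [hg]
        rw [sizeF, gtA, if_neg hend, if_neg hend, if_pos hguard, if_pos hguard,
          Nat.add_comm 1 f, gtB, if_neg hend, hg]
      | some nbrs =>
        have hgetD : (PySem.Dict.mk graph).getD node [] = nbrs := by
          simp [PySem.Dict.getD, hg]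
        by_cases hstop : (nbrs.isEmpty || PySem.Str.isIn node (passed ++ path)) = true
        · have hguard : (((PySem.Dict.mk graph).get? node).isNone
              || ((PySem.Dict.mk graph).getD node []).isEmpty
              || PySem.Str.isIn node (passed ++ path)) = true := by
            rw [hgetD, hg]
            rw [Option.isNone_some, Bool.false_or]
            exact hstop
          rw [sizeF, gtA, if_neg hend, if_neg hend, if_pos hguard, if_pos hguard,
            Nat.add_comm 1 f, gtB, if_neg hend, hg]
          simp only [hstop, if_true]
        · have hne : nbrs.isEmpty = false := by
            cases h : nbrs.isEmpty
            · rfl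
            · exact absurd (by rw [h, Bool.true_or]) hstop
          have hin : PySem.Str.isIn node (passed ++ path) = false := by
            cases h : PySem.Str.isIn node (passed ++ path)
            · rfl
            · exact absurd (by rw [h, Bool.or_true]) hstop
          have hguard : (((PySem.Dict.mk graph).get? node).isNone
              || ((PySem.Dict.mk graph).getD node []).isEmpty
              || PySem.Str.isIn node (passed ++ path)) = false := by
            rw [hgetD, hg, hne, hin]
            rw [Option.isNone_some, Bool.false_or, Bool.false_or]
          have hmu' : muKeys graph (passed ++ (path ++ node)) + 1 ≤ f' := by
            have hdec : muKeys graph ((passed ++ path) ++ node) < muKeys graph (passed ++ path) :=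
              mu_lt graph node (passed ++ path) (by simp [hg]) hin
            rw [String.append_assoc] at hdec
            omega
          rw [sizeF, gtA, if_neg hend, if_neg hend,
            if_neg (by rw [hguard]; exact Bool.false_ne_true), if_neg (by rw [hguard]; exact Bool.false_ne_true), hgetD,
            Nat.add_assoc, Nat.add_comm 1 _, gtB, if_neg hend, hg]
          simp only [hne, hin, Bool.or_self, Bool.false_eq_true, if_false]
          rw [push_rev_foldl]
          exact run_eq_children graph end_ passed f' node path ih hmu'
            (PySem.List.sorted nbrs (fun q => q.2) false) rest f

-- ===== VERDICT (by name: the statement is the Claim_ definition above) =====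
theorem greedy_traversal_spec : Claim_equal_greedy_traversal := by
  intro start end_ graph passed _hdom
  unfold Spec_greedy_traversal greedy_traversal greedy_traversal_alt
  have hmu : muKeys graph (passed ++ "") + 1 <= graph.length + 2 := by
    have h1 : muKeys graph (passed ++ "") <= (graph.map Prod.fst).length :=
      List.length_filter_le _ _
    rw [List.length_map] at h1
    omega
  have hs : sizeF graph end_ (graph.length + 2) start (passed ++ "") <=
      ((graph.map (fun q => q.2.length)).sum + 1) ^ (graph.length + 2) :=
    sizeF_le graph end_ (graph.length + 2) start (passed ++ "")
  have h := run_eq graph end_ passed (graph.length + 2) start "" []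
    ((((graph.map (fun q => q.2.length)).sum + 1) ^ (graph.length + 2)) -
      sizeF graph end_ (graph.length + 2) start (passed ++ "")) hmu
  rw [Nat.add_sub_cancel' hs] at h
  rw [String.append_empty] at h
  rw [h]
  cases hA : gtA graph end_ (graph.length + 2) start passed <;>
    simp [gtB_nil, String.empty_append]
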